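-- pv_equiv track=rewrite | github.com/aabestn/btp | visualise_function.py | make_unique_name
-- ===== SOURCE A (Python) =====
-- def make_unique_name(base, existing):
--     if base not in existing:
--         return base
--     k = 1
--     while True:
--         candidate = f"{base}_{k}"
--         if candidate not in existing:
--             return candidate
--         k += 1
-- ===== SOURCE B (Python) =====
-- def make_unique_name(base, existing):
--     if base not in existing:
--         return base
--     pre = base + "_"
--     used = set()
--     for s in existing:
--         if s.startswith(pre):
--             t = s[len(pre):]
--             if t and t[0] != '0' and all('0' <= c <= '9' for c in t):
--                 v = 0
--                 for c in t:
--                     v = v * 10 + (ord(c) - 48)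
--                 used.add(v)
--     k = 1
--     for v in sorted(used):
--         if v == k:
--             k += 1
--         elif v > k:
--             break
--     return pre + str(k)
-- ===== Notes on version B (the rewrite author's own statement) =====
-- stated objective: alternative
-- what changed: B replaces A's probe-each-candidate loop by an index-then-gap algorithm: one pass parses the canonical decimal suffixes after base+'_' into a set of integers, then a single scan of the sorted suffix set finds the first gap k>=1, with no membership probing of candidates at all.
import Mathlib
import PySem

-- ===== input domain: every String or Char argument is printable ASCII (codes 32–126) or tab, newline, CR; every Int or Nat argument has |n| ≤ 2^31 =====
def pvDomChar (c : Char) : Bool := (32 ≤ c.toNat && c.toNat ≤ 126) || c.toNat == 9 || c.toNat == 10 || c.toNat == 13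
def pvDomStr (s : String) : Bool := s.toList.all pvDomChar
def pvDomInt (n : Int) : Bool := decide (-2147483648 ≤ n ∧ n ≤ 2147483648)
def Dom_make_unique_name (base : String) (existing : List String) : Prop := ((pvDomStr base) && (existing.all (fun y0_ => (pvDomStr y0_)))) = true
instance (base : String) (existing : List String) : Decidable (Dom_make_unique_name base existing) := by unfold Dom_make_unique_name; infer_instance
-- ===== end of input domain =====

-- B replaces A's probe-each-candidate loop by an index-then-gap pass: parse the canonical
-- decimal suffixes after base+"_" into a set of integers, then scan the sorted set for the
-- first gap k >= 1 (no membership probing of candidates); objective: alternative algorithm.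


-- ===== PORT A =====
-- A's unbounded 'while True' probes candidates f"{base}_{k}" for k = 1, 2, …; ported with fuel
-- ex.length + 1 (proved sufficient below via pigeonhole; the fuel-0 branch returns the current
-- candidate and is never reached).
def pvALoop (base : List Char) (ex : List (List Char)) : Nat → Nat → List Char
  | 0, k => base ++ '_' :: PySem.Int.toChars (k : Int)
  | fuel+1, k =>
    let candidate := base ++ '_' :: PySem.Int.toChars (k : Int)
    if candidate ∈ ex then pvALoop base ex fuel (k+1) else candidate

def make_unique_name (base : String) (existing : List String) : String :=
  let ex := existing.map (·.toList)
  if base.toList ∈ ex then String.ofList (pvALoop base.toList ex (ex.length + 1) 1)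
  else base

-- ===== PORT B =====
-- Source B's suffix validator: t nonempty, no leading '0', all chars '0'..'9'
def pvCanon (t : List Char) : Bool :=
  !t.isEmpty && t.headD ' ' != '0' && t.all (fun c => decide ('0' ≤ c) && decide (c ≤ '9'))

-- Source B's inner loop 'v = v*10 + (ord(c) - 48)'
def pvVal (t : List Char) : Nat := t.foldl (fun a c => a * 10 + (c.toNat - 48)) 0

-- Source B's first pass: the set of parsed canonical suffixes after base+"_"
def pvUsed (pre : List Char) (ex : List (List Char)) : PySem.Set Nat :=
  ex.foldl (fun u s =>
    if PySem.Chars.startswith s pre then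
      let t := s.drop pre.length
      if pvCanon t then PySem.Set.add u (pvVal t) else u
    else u) PySem.Set.empty

-- Source B's gap scan over the sorted suffix set ('break' returns the current k)
def pvGap : List Nat → Nat → Nat
  | [], k => k
  | v :: rest, k => if v = k then pvGap rest (k+1) else if k < v then k else pvGap rest k

def make_unique_name_alt (base : String) (existing : List String) : String :=
  let ex := existing.map (·.toList)
  if base.toList ∈ ex then
    let pre := base.toList ++ ['_']
    let k := pvGap (PySem.List.sorted (pvUsed pre ex) (fun x => x) false) 1
    String.ofList (pre ++ PySem.Int.toChars (k : Int))
  else base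

-- ===== PRECONDITION & SPEC =====
def Spec_make_unique_name (base : String) (existing : List String) (out : String) : Prop := out = make_unique_name_alt base existing
instance (base : String) (existing : List String) (out : String) : Decidable (Spec_make_unique_name base existing out) := by unfold Spec_make_unique_name; infer_instance

-- ===== CLAIM (what is proved, stated in full; the proofs are below) =====
def Claim_equal_make_unique_name : Prop := ∀ (base : String) (existing : List String), Dom_make_unique_name base existing → Spec_make_unique_name base existing (make_unique_name base existing)

-- ===== LEMMAS AND PROOFS =====

def pvRep (n : Nat) : List Char :=
  if _h : n < 10 then [Nat.digitChar n]
  else pvRep (n / 10) ++ [Nat.digitChar (n % 10)]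
decreasing_by exact Nat.div_lt_self (by omega) (by norm_num)

lemma pv_toDigitsCore_eq_rep : ∀ (f n : Nat), n < f → ∀ ds, Nat.toDigitsCore 10 f n ds = pvRep n ++ ds := by
  intro f
  induction f with
  | zero => omega
  | succ f ih =>
    intro n hn ds
    by_cases h : n < 10
    · have h0 : n / 10 = 0 := Nat.div_eq_of_lt h
      simp [Nat.toDigitsCore, h0, pvRep, h, Nat.mod_eq_of_lt h]
    · have h0 : n / 10 ≠ 0 := by
        intro hc
        exact absurd (Nat.lt_of_div_eq_zero (by norm_num) hc) h
      simp only [Nat.toDigitsCore, if_neg h0]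
      rw [ih (n / 10) (by omega)]
      conv_rhs => rw [pvRep]
      simp [h]

lemma pv_toChars_eq_rep (k : Nat) : PySem.Int.toChars (k : Int) = pvRep k := by
  simp [PySem.Int.toChars, Nat.toDigits]
  rw [pv_toDigitsCore_eq_rep (k+1) k (by omega)]
  simp

lemma pv_digitChar_toNat {m : Nat} (h : m < 10) : (Nat.digitChar m).toNat = m + 48 := by
  interval_cases m <;> decide

lemma pv_char_le_iff {c d : Char} : c ≤ d ↔ c.toNat ≤ d.toNat := Char.le_def

lemma pv_char_eq_of_toNat {c d : Char} (h : c.toNat = d.toNat) : c = d := by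
  apply Char.ext; unfold Char.toNat at h; exact UInt32.toNat_inj.mp h

lemma pv_digitChar_recover {c : Char} (h0 : '0' ≤ c) (h9 : c ≤ '9') :
    Nat.digitChar (c.toNat - 48) = c := by
  rw [pv_char_le_iff] at h0 h9
  have h48 : (48 : Nat) ≤ c.toNat := h0
  have h57 : c.toNat ≤ 57 := h9
  apply pv_char_eq_of_toNat
  rw [pv_digitChar_toNat (by omega)]
  omega

lemma pv_digitChar_digit {m : Nat} (h : m < 10) : '0' ≤ Nat.digitChar m ∧ Nat.digitChar m ≤ '9' := by
  interval_cases m <;> exact ⟨by decide, by decide⟩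

lemma pv_parse_rep (n : Nat) : ∀ a : Nat,
    (pvRep n).foldl (fun a c => a * 10 + (c.toNat - 48)) a = a * 10 ^ (pvRep n).length + n := by
  induction n using pvRep.induct with
  | case1 n h =>
    intro a
    rw [pvRep]
    simp only [dif_pos h, List.foldl_cons, List.foldl_nil, List.length_singleton, pow_one]
    rw [pv_digitChar_toNat h]
    omega
  | case2 n h ih =>
    intro a
    rw [pvRep]
    simp only [dif_neg h, List.foldl_append, List.foldl_cons, List.foldl_nil, List.length_append,
      List.length_singleton]
    rw [ih a, pv_digitChar_toNat (Nat.mod_lt n (by norm_num))]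
    have hdm : 10 * (n / 10) + n % 10 = n := Nat.div_add_mod n 10
    ring_nf
    omega

lemma pv_val_rep (n : Nat) : pvVal (pvRep n) = n := by
  have := pv_parse_rep n 0
  simpa [pvVal] using this

lemma pv_rep_ne_nil (n : Nat) : pvRep n ≠ [] := by
  rw [pvRep]
  split_ifs <;> simp

lemma pv_rep_digits (n : Nat) : ∀ c ∈ pvRep n, '0' ≤ c ∧ c ≤ '9' := by
  induction n using pvRep.induct with
  | case1 n h =>
    rw [pvRep]; simp only [dif_pos h, List.mem_singleton]
    rintro c rfl; exact pv_digitChar_digit h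
  | case2 n h ih =>
    rw [pvRep]; simp only [dif_neg h, List.mem_append, List.mem_singleton]
    rintro c (hc | rfl)
    · exact ih c hc
    · exact pv_digitChar_digit (Nat.mod_lt n (by norm_num))

lemma pv_rep_head {n : Nat} (hn : 1 ≤ n) : (pvRep n).headD ' ' ≠ '0' := by
  induction n using pvRep.induct with
  | case1 n h =>
    rw [pvRep]; simp only [dif_pos h, List.headD_cons]
    intro hc
    have : (Nat.digitChar n).toNat = 48 := by rw [hc]; decide
    rw [pv_digitChar_toNat h] at this
    omega
  | case2 n h ih =>
    rw [pvRep]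
    have h1 : 1 ≤ n / 10 := by
      have : 10 ≤ n := by omega
      exact Nat.one_le_div_iff (by norm_num) |>.mpr this
    have := ih h1
    simp only [dif_neg h]
    rcases List.exists_cons_of_ne_nil (pv_rep_ne_nil (n / 10)) with ⟨c, t, hct⟩
    rw [hct] at this ⊢
    simpa using this

lemma pv_rep_canon {n : Nat} (h : 1 ≤ n) : pvCanon (pvRep n) = true := by
  have hd := pv_rep_digits n
  simp only [pvCanon, Bool.and_eq_true, List.all_eq_true, Bool.not_eq_eq_eq_not, bne_iff_ne]
  refine ⟨⟨by simpa [List.isEmpty_iff] using pv_rep_ne_nil n, pv_rep_head h⟩, ?_⟩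
  intro c hc
  rcases hd c hc with ⟨h1, h2⟩
  simp [h1, h2]

lemma pv_foldl_le (t : List Char) : ∀ a : Nat, a ≤ t.foldl (fun a c => a * 10 + (c.toNat - 48)) a := by
  induction t with
  | nil => intro a; simp
  | cons c t ih =>
    intro a
    simp only [List.foldl_cons]
    exact le_trans (by omega) (ih (a * 10 + (c.toNat - 48)))

lemma pv_canon_parts {t : List Char} (h : pvCanon t = true) :
    t ≠ [] ∧ t.headD ' ' ≠ '0' ∧ ∀ c ∈ t, '0' ≤ c ∧ c ≤ '9' := by
  simp only [pvCanon, Bool.and_eq_true, List.all_eq_true, Bool.not_eq_eq_eq_not, bne_iff_ne] at h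
  refine ⟨by simpa [List.isEmpty_iff] using h.1.1, h.1.2, fun c hc => ?_⟩
  have := h.2 c hc
  simp only [decide_eq_true_eq] at this
  exact this

lemma pv_val_pos {t : List Char} (h : pvCanon t = true) : 1 ≤ pvVal t := by
  rcases pv_canon_parts h with ⟨hne, hhd, hdig⟩
  rcases List.exists_cons_of_ne_nil hne with ⟨c, rest, rfl⟩
  simp only [List.headD_cons] at hhd
  rcases hdig c (by simp) with ⟨h1, h2⟩
  rw [pv_char_le_iff] at h1
  have h48 : (48:Nat) ≤ c.toNat := h1
  have hne48 : c.toNat ≠ 48 := fun hc => hhd (pv_char_eq_of_toNat (by rw [hc]; decide))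
  have : 1 ≤ c.toNat - 48 := by omega
  calc 1 ≤ 0 * 10 + (c.toNat - 48) := by omega
    _ ≤ _ := pv_foldl_le rest _

lemma pv_canon_rep : ∀ t : List Char, pvCanon t = true → pvRep (pvVal t) = t := by
  intro t
  induction t using List.reverseRecOn with
  | nil => intro h; exact absurd (pv_canon_parts h).1 (by simp)
  | append_singleton t' c ih =>
    intro h
    rcases pv_canon_parts h with ⟨-, hhd, hdig⟩
    rcases hdig c (by simp) with ⟨hc0, hc9⟩
    rw [pv_char_le_iff] at hc0 hc9
    have hc48 : (48:Nat) ≤ c.toNat := hc0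
    have hc57 : c.toNat ≤ 57 := hc9
    have hm : c.toNat - 48 < 10 := by omega
    have hrec : Nat.digitChar (c.toNat - 48) = c :=
      pv_digitChar_recover (by rw [pv_char_le_iff]; exact hc0) (by rw [pv_char_le_iff]; exact hc9)
    have hval : pvVal (t' ++ [c]) = pvVal t' * 10 + (c.toNat - 48) := by
      simp [pvVal, List.foldl_append]
    rcases eq_or_ne t' [] with rfl | hne
    · -- single digit
      simp only [List.headD_cons, List.nil_append] at hhd
      have hne48 : c.toNat ≠ 48 := fun hc => hhd (by simpa using pv_char_eq_of_toNat (by rw [hc]; decide))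
      rw [hval]
      simp only [pvVal, List.foldl_nil, Nat.zero_mul, Nat.zero_add]
      rw [pvRep]
      simp [dif_pos hm, hrec]
    · -- longer string: t' is canonical too
      have hcanon' : pvCanon t' = true := by
        simp only [pvCanon, Bool.and_eq_true, List.all_eq_true, Bool.not_eq_eq_eq_not, bne_iff_ne]
        rcases List.exists_cons_of_ne_nil hne with ⟨d, u, rfl⟩
        simp only [List.cons_append, List.headD_cons] at hhd
        refine ⟨⟨by simp, hhd⟩, ?_⟩
        intro x hx
        rcases hdig x (by rcases List.mem_cons.mp hx with h | h <;> simp [h]) with ⟨h1, h2⟩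
        simp [h1, h2]
      have hv' : 1 ≤ pvVal t' := pv_val_pos hcanon'
      rw [hval, pvRep]
      have hge : ¬ pvVal t' * 10 + (c.toNat - 48) < 10 := by omega
      simp only [dif_neg hge]
      have hdiv : (pvVal t' * 10 + (c.toNat - 48)) / 10 = pvVal t' := by omega
      have hmod : (pvVal t' * 10 + (c.toNat - 48)) % 10 = c.toNat - 48 := by omega
      rw [hdiv, hmod, hrec, ih hcanon']

def pvSuffix (pre : List Char) (s : List Char) : Option Nat :=
  if PySem.Chars.startswith s pre then
    (if pvCanon (s.drop pre.length) then some (pvVal (s.drop pre.length)) else none)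
  else none

lemma pv_used_eq (pre : List Char) (ex : List (List Char)) :
    pvUsed pre ex = PySem.Set.ofList (ex.filterMap (pvSuffix pre)) := by
  rw [pvUsed, PySem.Set.ofList_eq_foldl]
  suffices h : ∀ (u : PySem.Set Nat), ex.foldl (fun u s =>
      if PySem.Chars.startswith s pre then
        if pvCanon (s.drop pre.length) then PySem.Set.add u (pvVal (s.drop pre.length)) else u
      else u) u = (ex.filterMap (pvSuffix pre)).foldl PySem.Set.add u from h _
  induction ex with
  | nil => intro u; simp
  | cons s ex ih =>
    intro u
    simp only [List.foldl_cons, List.filterMap_cons, pvSuffix]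
    split_ifs with h1 h2 <;> simp only [List.foldl_cons] <;> rw [ih] <;> rfl

lemma pv_mem_used_iff (pre : List Char) (ex : List (List Char)) (m : Nat) :
    m ∈ pvUsed pre ex ↔ ∃ s ∈ ex, pvSuffix pre s = some m := by
  rw [pv_used_eq, PySem.Set.mem_ofList, List.mem_filterMap]

lemma pv_suffix_eq (pre s : List Char) (m : Nat) :
    pvSuffix pre s = some m ↔ (1 ≤ m ∧ s = pre ++ pvRep m) := by
  constructor
  · intro h
    unfold pvSuffix at h
    split_ifs at h with h1 h2
    · have hv : pvVal (s.drop pre.length) = m := by simpa using h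
      have hrep : pvRep m = s.drop pre.length := by rw [← hv]; exact pv_canon_rep _ h2
      have hpos : 1 ≤ m := hv ▸ pv_val_pos h2
      rcases (PySem.Chars.startswith_iff s pre).mp h1 with ⟨t, rfl⟩
      refine ⟨hpos, ?_⟩
      rw [hrep]
      simp
  · rintro ⟨hm, rfl⟩
    have h1 : PySem.Chars.startswith (pre ++ pvRep m) pre = true :=
      (PySem.Chars.startswith_iff _ pre).mpr ⟨pvRep m, rfl⟩
    have hd : (pre ++ pvRep m).drop pre.length = pvRep m := by simp
    unfold pvSuffix
    rw [if_pos h1, hd, if_pos (pv_rep_canon hm), pv_val_rep]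

lemma pv_mem_used (pre : List Char) (ex : List (List Char)) (m : Nat) (hm : 1 ≤ m) :
    m ∈ pvUsed pre ex ↔ pre ++ pvRep m ∈ ex := by
  rw [pv_mem_used_iff]
  constructor
  · rintro ⟨s, hs, h⟩
    rcases (pv_suffix_eq pre s m).mp h with ⟨-, rfl⟩
    exact hs
  · intro h
    exact ⟨pre ++ pvRep m, h, (pv_suffix_eq pre _ m).mpr ⟨hm, rfl⟩⟩

lemma pv_mem_used_pos (pre : List Char) (ex : List (List Char)) (m : Nat) :
    m ∈ pvUsed pre ex → 1 ≤ m := by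
  rw [pv_mem_used_iff]
  rintro ⟨s, -, h⟩
  exact ((pv_suffix_eq pre s m).mp h).1

lemma pv_gap_spec : ∀ (vs : List Nat) (k : Nat), vs.Pairwise (· < ·) → (∀ v ∈ vs, k ≤ v) →
    pvGap vs k ∉ vs ∧ k ≤ pvGap vs k ∧ ∀ m, k ≤ m → m < pvGap vs k → m ∈ vs := by
  intro vs
  induction vs with
  | nil => intro k _ _; exact ⟨by simp, le_refl k, fun m h1 h2 => by simp [pvGap] at h2; omega⟩
  | cons v rest ih =>
    intro k hp hlow
    have hpr : rest.Pairwise (· < ·) := hp.tail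
    have hvrest : ∀ u ∈ rest, v < u := fun u hu => (List.pairwise_cons.mp hp).1 u hu
    by_cases hv : v = k
    · subst hv
      have hlow' : ∀ u ∈ rest, v + 1 ≤ u := fun u hu => hvrest u hu
      rcases ih (v+1) hpr hlow' with ⟨hnm, hle, hall⟩
      have hg : pvGap (v :: rest) v = pvGap rest (v+1) := by simp [pvGap]
      rw [hg]
      refine ⟨?_, by omega, ?_⟩
      · intro hmem
        rcases List.mem_cons.mp hmem with h | h
        · omega
        · exact hnm h
      · intro m h1 h2
        rcases eq_or_lt_of_le h1 with rfl | h1'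
        · simp
        · exact List.mem_cons_of_mem _ (hall m (by omega) h2)
    · have hkv : k < v := lt_of_le_of_ne (hlow v (by simp)) (Ne.symm hv)
      have hg : pvGap (v :: rest) k = k := by simp [pvGap, hv, hkv]
      rw [hg]
      refine ⟨?_, le_refl k, fun m h1 h2 => by omega⟩
      intro hmem
      rcases List.mem_cons.mp hmem with h | h
      · omega
      · have := hvrest k h; omega

lemma pv_aloop_eq (base : List Char) (ex : List (List Char)) (N : Nat)
    (hfree : base ++ '_' :: pvRep (N+1) ∉ ex)
    (hmin : ∀ j, 1 ≤ j → j < N + 1 → base ++ '_' :: pvRep j ∈ ex) :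
    ∀ fuel k, 1 ≤ k → k ≤ N + 1 → N + 1 - k < fuel →
      pvALoop base ex fuel k = base ++ '_' :: pvRep (N+1) := by
  intro fuel
  induction fuel with
  | zero => intro k _ _ h; omega
  | succ fuel ih =>
    intro k hk1 hkN hfuel
    simp only [pvALoop, pv_toChars_eq_rep]
    rcases eq_or_lt_of_le hkN with rfl | hlt
    · rw [if_neg hfree]
    · rw [if_pos (hmin k hk1 hlt)]
      exact ih (k+1) (by omega) (by omega) (by omega)

lemma pv_nodup_length {l l' : List (List Char)} (h : l.Nodup) (s : l ⊆ l') : l.length ≤ l'.length := by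
  calc l.length = l.toFinset.card := (List.toFinset_card_of_nodup h).symm
    _ ≤ l'.toFinset.card := Finset.card_le_card (fun x hx => by
        simp only [List.mem_toFinset] at hx ⊢; exact s hx)
    _ ≤ l'.length := l'.toFinset_card_le

lemma pv_exists_free (base : List Char) (ex : List (List Char)) :
    ∃ j, j ≤ ex.length ∧ base ++ '_' :: pvRep (j+1) ∉ ex := by
  by_contra hc
  rw [not_exists] at hc
  simp only [not_and, not_not] at hc
  have hall : ∀ j ≤ ex.length, base ++ '_' :: pvRep (j+1) ∈ ex := hc
  set L := (List.range (ex.length + 1)).map (fun j => base ++ '_' :: pvRep (j+1)) with hL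
  have hnd : L.Nodup := by
    refine List.Nodup.map ?_ (List.nodup_range)
    intro a b hab
    have : pvRep (a+1) = pvRep (b+1) := by
      have h2 := List.append_cancel_left hab
      simpa using h2
    have := congrArg pvVal this
    rw [pv_val_rep, pv_val_rep] at this
    omega
  have hsub : L ⊆ ex := by
    intro x hx
    rw [hL, List.mem_map] at hx
    rcases hx with ⟨j, hj, rfl⟩
    exact hall j (by simpa using Nat.lt_succ_iff.mp (List.mem_range.mp hj))
  have := pv_nodup_length hnd hsub
  simp [hL] at this

-- ===== VERDICT (by name: the statement is the Claim_ definition above) =====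
theorem make_unique_name_spec : Claim_equal_make_unique_name := by
  intro base existing _
  unfold Spec_make_unique_name
  unfold make_unique_name make_unique_name_alt
  simp only []
  set ex := existing.map (·.toList) with hex
  by_cases h : base.toList ∈ ex
  · rw [if_pos h, if_pos h]
    set pre := base.toList ++ ['_'] with hpre
    have hcand : ∀ m : Nat, base.toList ++ '_' :: pvRep m = pre ++ pvRep m := by
      intro m; rw [hpre]; simp
    rcases pv_exists_free base.toList ex with ⟨j0, hj0, hfree0⟩
    have hQ : ∃ j, base.toList ++ '_' :: pvRep (j+1) ∉ ex := ⟨j0, hfree0⟩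
    set N := Nat.find hQ with hN
    have hNfree : base.toList ++ '_' :: pvRep (N+1) ∉ ex := Nat.find_spec hQ
    have hNle : N ≤ ex.length := le_trans (Nat.find_min' hQ hfree0) hj0
    have hNmin : ∀ j, 1 ≤ j → j < N + 1 → base.toList ++ '_' :: pvRep j ∈ ex := by
      intro j h1 h2
      have := Nat.find_min hQ (m := j - 1) (by omega)
      rw [not_not] at this
      have hj : j - 1 + 1 = j := by omega
      rwa [hj] at this
    rw [pv_aloop_eq base.toList ex N hNfree hNmin (ex.length + 1) 1 (by omega) (by omega) (by omega)]
    set vs := PySem.List.sorted (pvUsed pre ex) (fun x => x) false with hvs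
    have hperm : vs.Perm (pvUsed pre ex) := PySem.List.sorted_perm _ _ _
    have hpw : vs.Pairwise (· < ·) := by
      rw [hvs, pv_used_eq]
      exact PySem.List.sorted_ofList_pairwise_lt _
    have hmemvs : ∀ m : Nat, m ∈ vs ↔ m ∈ pvUsed pre ex := fun m => hperm.mem_iff
    have hlow : ∀ v ∈ vs, 1 ≤ v := fun v hv => pv_mem_used_pos pre ex v ((hmemvs v).mp hv)
    rcases pv_gap_spec vs 1 hpw hlow with ⟨hgnm, hgle, hgall⟩
    set g := pvGap vs 1 with hg
    have hgeq : g = N + 1 := by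
      have h1 : N + 1 ≤ g := by
        have hfreeg : pre ++ pvRep g ∉ ex := by
          intro hcon
          exact hgnm ((hmemvs g).mpr ((pv_mem_used pre ex g hgle).mpr hcon))
        have hfree' : base.toList ++ '_' :: pvRep (g - 1 + 1) ∉ ex := by
          have hg1 : g - 1 + 1 = g := by omega
          rw [hg1, hcand g]; exact hfreeg
        have := Nat.find_min' hQ hfree'
        omega
      have h2 : ¬ (N + 1 < g) := by
        intro hcon
        have hmem := hgall (N+1) (by omega) hcon
        have := (pv_mem_used pre ex (N+1) (by omega)).mp ((hmemvs _).mp hmem)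
        rw [← hcand (N+1)] at this
        exact hNfree this
      omega
    rw [pv_toChars_eq_rep, hgeq, hcand (N+1)]
  · rw [if_neg h, if_neg h]
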